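-- pv_equiv track=rewrite | github.com/Dhruv00000/- | Zeta Function/Prime Factor Counting Function based Series/No Prime Factor Repititon/Zeta(2)/zeta_2.py | epsilonModified
-- ===== SOURCE A (Python) =====
-- def epsilonModified(n):
--     PrimeFactorCount: int = 0
--
--     if n % 2 == 0:
--         n = n // 2
--         PrimeFactorCount += 1
--
--     for i in range(3, n + 1, 2):
--         if n % i== 0:
--             n = n // i
--             PrimeFactorCount += 1
--         if n % i == 0:
--             PrimeFactorCount = 0
--
--     if n % 2 == 0:
--         PrimeFactorCount = 0
--
--     return PrimeFactorCount
-- ===== SOURCE B (Python) =====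
-- def epsilonModified(n):
--     count = 0
--     if n % 2 == 0:
--         n = n // 2
--         count = 1
--
--     # collect all divisors of n in O(sqrt(n)) instead of scanning every odd i up to n
--     divs = set()
--     d = 1
--     while d * d <= n:
--         if n % d == 0:
--             divs.add(d)
--             divs.add(n // d)
--         d += 1
--
--     for i in sorted(x for x in divs if x % 2 == 1 and x >= 3):
--         if n % i == 0:
--             n = n // i
--             count += 1
--         if n % i == 0:
--             count = 0
--
--     if n % 2 == 0:
--         count = 0
--
--     return count
-- ===== Notes on version B (the rewrite author's own statement) =====
-- stated objective: faster
-- what changed: Instead of scanning every odd i from small up to n, B enumerates all divisors of n in O(sqrt(n)) trial pairs and replays the loop body only over the sorted odd proper candidate divisors (the only iterations of A's loop that change anything).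
import Mathlib
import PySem

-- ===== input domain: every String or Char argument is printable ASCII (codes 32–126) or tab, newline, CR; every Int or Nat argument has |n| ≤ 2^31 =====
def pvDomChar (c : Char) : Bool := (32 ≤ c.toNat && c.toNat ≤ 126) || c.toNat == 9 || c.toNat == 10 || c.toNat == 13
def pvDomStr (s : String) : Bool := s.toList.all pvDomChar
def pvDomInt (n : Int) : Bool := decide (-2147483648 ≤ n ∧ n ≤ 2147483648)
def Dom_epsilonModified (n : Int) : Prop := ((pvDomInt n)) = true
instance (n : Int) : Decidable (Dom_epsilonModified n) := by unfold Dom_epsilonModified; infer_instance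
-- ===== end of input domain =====

-- B replaces A's O(n) scan over every odd i in [3, n] by an O(sqrt n) divisor enumeration,
-- replaying the loop body only over the sorted odd candidate divisors, the only iterations that act.

-- ===== PORT A =====
-- the body of the 'for i in ...' loop, written identically in both sources (state = (n, PrimeFactorCount))
def pvStep (s : Int × Int) (i : Int) : Int × Int :=
  let s := if PySem.Int.mod s.1 i = 0 then (PySem.Int.floordiv s.1 i, s.2 + 1) else s
  if PySem.Int.mod s.1 i = 0 then (s.1, 0) else s

def epsilonModified (n : Int) : Int :=
  let s0 : Int × Int := if PySem.Int.mod n 2 = 0 then (PySem.Int.floordiv n 2, 1) else (n, 0)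
  let s := (PySem.List.pyRange 3 (s0.1 + 1) 2).foldl pvStep s0
  if PySem.Int.mod s.1 2 = 0 then 0 else s.2

-- ===== PORT B =====
-- the 'while d * d <= n' divisor-collecting loop of B
def pvCollect (n0 : Int) (d : Int) (s : PySem.Set Int) : PySem.Set Int :=
  if h : d * d ≤ n0 then
    pvCollect n0 (d + 1)
      (if PySem.Int.mod n0 d = 0 then
        PySem.Set.add (PySem.Set.add s d) (PySem.Int.floordiv n0 d)
      else s)
  else s
termination_by (n0 + 1 - d).toNat
decreasing_by
  have hd : d ≤ d * d := by
    rcases (by omega : d ≤ 0 ∨ 0 < d) with h0 | h0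
    · exact le_trans h0 (mul_self_nonneg d)
    · calc d = d * 1 := by ring
        _ ≤ d * d := by exact mul_le_mul_of_nonneg_left h0 (by omega)
  omega

def epsilonModified_alt (n : Int) : Int :=
  let s0 : Int × Int := if PySem.Int.mod n 2 = 0 then (PySem.Int.floordiv n 2, 1) else (n, 0)
  let odd := PySem.List.sorted
    ((pvCollect s0.1 1 PySem.Set.empty).filter
      (fun x => PySem.Int.mod x 2 == 1 && decide (3 ≤ x)))
    (fun x => x)
  let s := odd.foldl pvStep s0
  if PySem.Int.mod s.1 2 = 0 then 0 else s.2

-- ===== PRECONDITION & SPEC =====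
def Spec_epsilonModified (n : Int) (out : Int) : Prop := out = epsilonModified_alt n
instance (n : Int) (out : Int) : Decidable (Spec_epsilonModified n out) := by unfold Spec_epsilonModified; infer_instance

-- ===== CLAIM (what is proved, stated in full; the proofs are below) =====
def Claim_equal_epsilonModified : Prop := ∀ (n : Int), Dom_epsilonModified n → Spec_epsilonModified n (epsilonModified n)

-- ===== LEMMAS AND PROOFS =====

lemma pvLe_mul_self (e : Int) (h : 1 ≤ e) : e ≤ e * e := by nlinarith

-- what pvCollect collects: the divisor pairs (e, n0 // e) for every e ≥ d with e * e ≤ n0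
lemma pvMem_pvCollect (k : Nat) : ∀ (n0 d : Int) (s : PySem.Set Int) (x : Int),
    (n0 + 1 - d).toNat ≤ k → 1 ≤ d →
    (x ∈ pvCollect n0 d s ↔ x ∈ s ∨ ∃ e : Int, d ≤ e ∧ e * e ≤ n0 ∧
      PySem.Int.mod n0 e = 0 ∧ (x = e ∨ x = PySem.Int.floordiv n0 e)) := by
  induction k with
  | zero =>
    intro n0 d s x hk hd
    have hnd : n0 < d := by omega
    have hstop : ¬ d * d ≤ n0 := by
      have := pvLe_mul_self d hd; linarith
    rw [pvCollect, dif_neg hstop]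
    constructor
    · exact Or.inl
    · rintro (hx | ⟨e, he, hee, -, -⟩)
      · exact hx
      · exfalso
        have h1 : (1:Int) ≤ e := le_trans hd he
        have := pvLe_mul_self e h1
        linarith
  | succ k ih =>
    intro n0 d s x hk hd
    rw [pvCollect]
    by_cases h : d * d ≤ n0
    · rw [dif_pos h]
      have hdd : d ≤ d * d := pvLe_mul_self d hd
      have hk' : (n0 + 1 - (d + 1)).toNat ≤ k := by
        have hdn : d ≤ n0 := le_trans hdd h
        omega
      rw [ih n0 (d + 1) _ x hk' (by omega)]
      by_cases hm : PySem.Int.mod n0 d = 0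
      · rw [if_pos hm]
        simp only [PySem.Set.mem_add]
        constructor
        · rintro (((hx | rfl) | rfl) | ⟨e, he, hee, hme, hxe⟩)
          · exact Or.inl hx
          · exact Or.inr ⟨x, le_refl x, h, hm, Or.inl rfl⟩
          · exact Or.inr ⟨d, le_refl d, h, hm, Or.inr rfl⟩
          · exact Or.inr ⟨e, by omega, hee, hme, hxe⟩
        · rintro (hx | ⟨e, he, hee, hme, hxe⟩)
          · exact Or.inl (Or.inl (Or.inl hx))
          · rcases eq_or_lt_of_le he with rfl | hlt
            · rcases hxe with rfl | rfl
              · exact Or.inl (Or.inl (Or.inr rfl))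
              · exact Or.inl (Or.inr rfl)
            · exact Or.inr ⟨e, by omega, hee, hme, hxe⟩
      · rw [if_neg hm]
        constructor
        · rintro (hx | ⟨e, he, hee, hme, hxe⟩)
          · exact Or.inl hx
          · exact Or.inr ⟨e, by omega, hee, hme, hxe⟩
        · rintro (hx | ⟨e, he, hee, hme, hxe⟩)
          · exact Or.inl hx
          · have hne : d ≠ e := by rintro rfl; exact hm hme
            exact Or.inr ⟨e, by omega, hee, hme, hxe⟩
    · rw [dif_neg h]
      constructor
      · exact Or.inl
      · rintro (hx | ⟨e, he, hee, -, -⟩)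
        · exact hx
        · exfalso
          have h1 : (1:Int) ≤ e := le_trans hd he
          have h2 : d * d ≤ e * e :=
            mul_le_mul he he (by omega) (by omega)
          linarith

lemma pvNodup_pvCollect (k : Nat) : ∀ (n0 d : Int) (s : PySem.Set Int),
    (n0 + 1 - d).toNat ≤ k → s.Nodup → (pvCollect n0 d s).Nodup := by
  induction k with
  | zero =>
    intro n0 d s hk hs
    have hstop : ¬ d * d ≤ n0 := by
      have := mul_self_nonneg d
      rcases (by omega : d ≤ 0 ∨ 1 ≤ d) with h0 | h0
      · omega
      · have := pvLe_mul_self d h0; omega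
    rw [pvCollect, dif_neg hstop]; exact hs
  | succ k ih =>
    intro n0 d s hk hs
    rw [pvCollect]
    by_cases h : d * d ≤ n0
    · rw [dif_pos h]
      have hdd : d ≤ d * d := by
        rcases (by omega : d ≤ 0 ∨ 0 < d) with h0 | h0
        · exact le_trans h0 (mul_self_nonneg d)
        · exact pvLe_mul_self d h0
      refine ih n0 (d + 1) _ (by omega) ?_
      by_cases hm : PySem.Int.mod n0 d = 0
      · rw [if_pos hm]
        exact PySem.Set.nodup_add _ _ (PySem.Set.nodup_add _ _ hs)
      · rw [if_neg hm]; exact hs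
    · rw [dif_neg h]; exact hs

lemma pvPairwise_pyRange2 (a b : Int) : (PySem.List.pyRange a b 2).Pairwise (· < ·) := by
  rw [PySem.List.pyRange_of_pos a b (by norm_num)]
  exact List.pairwise_lt_range.map _ (by intro i j hij; omega)

-- the arithmetic core: x is produced by some sqrt-bounded divisor pair of m and is odd and ≥ 3
-- iff x is an odd element of [3, m] dividing m
lemma pvDivisorIff (m x : Int) :
    ((∃ e : Int, 1 ≤ e ∧ e * e ≤ m ∧ PySem.Int.mod m e = 0 ∧
        (x = e ∨ x = PySem.Int.floordiv m e)) ∧ PySem.Int.mod x 2 = 1 ∧ 3 ≤ x)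
    ↔ ((3 ≤ x ∧ x < m + 1 ∧ (2:Int) ∣ x - 3) ∧ PySem.Int.mod m x = 0) := by
  have hmod2 : PySem.Int.mod x 2 = x % 2 := PySem.Int.mod_eq_emod_of_pos (by norm_num)
  constructor
  · rintro ⟨⟨e, he1, hee, hme, hxe⟩, hodd, h3⟩
    have hle : e ≤ e * e := pvLe_mul_self e he1
    have hm1 : (1:Int) ≤ m := by linarith
    have hdvd_e : e ∣ m := (PySem.Int.mod_eq_zero_iff_dvd m e).mp hme
    have hodd' : (2:Int) ∣ x - 3 := by rw [hmod2] at hodd; omega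
    rcases hxe with rfl | rfl
    · exact ⟨⟨h3, by linarith, hodd'⟩, hme⟩
    · obtain ⟨c, hc⟩ := hdvd_e
      have hfd : PySem.Int.floordiv m e = c := by
        rw [PySem.Int.floordiv_eq_ediv_of_pos (by omega), hc,
          Int.mul_ediv_cancel_left c (by omega)]
      have hc1 : 1 ≤ c := by nlinarith
      refine ⟨⟨h3, by nlinarith, hodd'⟩, ?_⟩
      rw [PySem.Int.mod_eq_zero_iff_dvd, hfd]
      exact ⟨e, by rw [hc]; ring⟩
  · rintro ⟨⟨h3, hlt, hodd⟩, hmx⟩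
    have hxm : x ≤ m := by omega
    obtain ⟨c, hc⟩ := (PySem.Int.mod_eq_zero_iff_dvd m x).mp hmx
    have hc1 : 1 ≤ c := by nlinarith
    refine ⟨?_, by rw [hmod2]; omega, h3⟩
    by_cases hxx : x * x ≤ m
    · exact ⟨x, by omega, hxx, hmx, Or.inl rfl⟩
    · have hcx : c < x := by nlinarith
      refine ⟨c, hc1, by nlinarith, ?_, Or.inr ?_⟩
      · rw [PySem.Int.mod_eq_zero_iff_dvd]; exact ⟨x, by rw [hc]; ring⟩
      · rw [PySem.Int.floordiv_eq_ediv_of_pos (by omega), hc, mul_comm,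
          Int.mul_ediv_cancel_left x (by omega)]

-- B's sorted odd-divisor list is exactly A's range filtered to the i that divide m
lemma pvOddList_eq (m : Int) :
    PySem.List.sorted
      ((pvCollect m 1 PySem.Set.empty).filter
        (fun x => PySem.Int.mod x 2 == 1 && decide (3 ≤ x)))
      (fun x => x)
    = (PySem.List.pyRange 3 (m + 1) 2).filter (fun i => decide (PySem.Int.mod m i = 0)) := by
  apply PySem.List.sorted_eq_of_perm_of_pairwise_lt
  · have hnod1 : ((PySem.List.pyRange 3 (m + 1) 2).filter
        (fun i => decide (PySem.Int.mod m i = 0))).Nodup :=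
      ((pvPairwise_pyRange2 3 (m + 1)).filter _).imp (fun h => ne_of_lt h)
    have hnod2 : ((pvCollect m 1 PySem.Set.empty).filter
        (fun x => PySem.Int.mod x 2 == 1 && decide (3 ≤ x))).Nodup :=
      (pvNodup_pvCollect m.toNat m 1 PySem.Set.empty (by omega) List.nodup_nil).filter _
    rw [List.perm_ext_iff_of_nodup hnod1 hnod2]
    intro x
    simp only [List.mem_filter, PySem.List.mem_pyRange_iff_of_pos (by norm_num : (0:Int) < 2),
      pvMem_pvCollect m.toNat m 1 PySem.Set.empty x (by omega) (by omega),
      Bool.and_eq_true, beq_iff_eq, decide_eq_true_eq]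
    simp only [PySem.Set.empty, List.not_mem_nil, false_or]
    rw [← pvDivisorIff m x]
  · exact (pvPairwise_pyRange2 3 (m + 1)).filter _

-- iterations of the loop at an i not dividing m are no-ops (the current n always divides m)
lemma pvFoldlFilter (m : Int) : ∀ (l : List Int), (∀ i ∈ l, 0 < i) → ∀ (s : Int × Int),
    s.1 ∣ m → l.foldl pvStep s
      = (l.filter (fun i => decide (PySem.Int.mod m i = 0))).foldl pvStep s := by
  intro l
  induction l with
  | nil => intro _ s _; rfl
  | cons i t ih =>
    intro hpos s hs
    have hi : 0 < i := hpos i (by simp)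
    have hpos' : ∀ j ∈ t, 0 < j := fun j hj => hpos j (by simp [hj])
    by_cases hm : PySem.Int.mod m i = 0
    · rw [List.filter_cons_of_pos (by simp [hm]), List.foldl_cons, List.foldl_cons]
      apply ih hpos'
      by_cases hc : PySem.Int.mod s.1 i = 0
      · obtain ⟨c, hcc⟩ := (PySem.Int.mod_eq_zero_iff_dvd _ _).mp hc
        have hq : PySem.Int.floordiv s.1 i = c := by
          rw [PySem.Int.floordiv_eq_ediv_of_pos hi, hcc,
            Int.mul_ediv_cancel_left c (by omega)]
        have hcd : c ∣ m := dvd_trans ⟨i, by rw [hcc]; ring⟩ hs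
        simp only [pvStep, hc, if_true, hq]
        split_ifs <;> exact hcd
      · simp only [pvStep, hc, if_false]
        exact hs
    · have hii : ¬ (i ∣ s.1) :=
        fun hdv => hm ((PySem.Int.mod_eq_zero_iff_dvd m i).mpr (dvd_trans hdv hs))
      have hc : PySem.Int.mod s.1 i ≠ 0 :=
        fun h => hii ((PySem.Int.mod_eq_zero_iff_dvd _ _).mp h)
      have hstep : pvStep s i = s := by
        simp only [pvStep, if_neg hc]
      rw [List.foldl_cons, hstep, List.filter_cons_of_neg (by simp [hm])]
      exact ih hpos' s hs

-- ===== VERDICT (by name: the statement is the Claim_ definition above) =====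
theorem epsilonModified_spec : Claim_equal_epsilonModified := by
  intro n _
  unfold Spec_epsilonModified epsilonModified epsilonModified_alt
  dsimp only
  generalize (if PySem.Int.mod n 2 = 0 then (PySem.Int.floordiv n 2, (1:Int)) else (n, 0)) = s0
  rw [pvOddList_eq s0.1]
  rw [← pvFoldlFilter s0.1 _ ?_ s0 dvd_rfl]
  intro i hi
  have := (PySem.List.mem_pyRange_iff_of_pos (by norm_num : (0:Int) < 2) i).mp hi
  omega
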